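-- pv_equiv track=rewrite | github.com/mparq/advent-of-code | day7-internet-protocol-version-7/ipv7.py | findAbba
-- ===== SOURCE A (Python) =====
-- def findAbba(haystack):
-- 	index = 1
-- 	while index < len(haystack) - 2:
-- 		needle = haystack[index]
-- 		if needle == haystack[index + 1]:
-- 			if (needle != haystack[index - 1]
-- 			   		and haystack[index - 1] == haystack[index + 2]):
-- 				return haystack[index - 1 : index + 3]
-- 		index += 1
-- ===== SOURCE B (Python) =====
-- import re
--
-- # Leftmost A-B-B-A (A != B) via one regex search with backreferences;
-- # DOTALL so '.' also matches newlines, like A's raw character comparisons.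
-- _ABBA = re.compile(r'(.)((?!\1).)\2\1', re.DOTALL)
--
--
-- def findAbba(haystack):
--     m = _ABBA.search(haystack)
--     return m.group(0) if m else None
-- ===== Notes on version B (the rewrite author's own statement) =====
-- stated objective: idiomatic
-- what changed: Replaces the manual index-based while loop over middle pairs with a single compiled regex search using backreferences ((.)((?!\1).)\2\1, DOTALL) that returns the leftmost ABBA match.
import Mathlib
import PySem

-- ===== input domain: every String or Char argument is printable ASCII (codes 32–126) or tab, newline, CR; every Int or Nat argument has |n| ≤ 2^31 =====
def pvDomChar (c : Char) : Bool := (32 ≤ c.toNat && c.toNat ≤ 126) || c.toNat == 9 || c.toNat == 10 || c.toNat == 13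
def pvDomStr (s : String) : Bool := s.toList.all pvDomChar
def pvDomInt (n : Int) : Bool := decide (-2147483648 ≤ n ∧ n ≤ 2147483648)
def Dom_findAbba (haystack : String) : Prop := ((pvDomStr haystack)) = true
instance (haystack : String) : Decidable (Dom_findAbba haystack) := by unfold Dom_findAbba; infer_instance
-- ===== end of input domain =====

-- B replaces A's manual while-loop scan with one regex search (idiomatic); equal return value on all inputs.

-- ===== PORT A =====
-- A's while loop: index runs from 1 while index < len - 2; all in-loop accesses are in range,
-- so getD's default is never used.
def findAbbaGo (cs : List Char) (index : Nat) : Option String :=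
  if index + 2 < cs.length then
    let needle := cs.getD index ' '
    if needle == cs.getD (index + 1) ' ' then
      if needle != cs.getD (index - 1) ' ' && cs.getD (index - 1) ' ' == cs.getD (index + 2) ' ' then
        some (String.mk ((cs.drop (index - 1)).take 4))   -- haystack[index-1 : index+3]
      else findAbbaGo cs (index + 1)
    else findAbbaGo cs (index + 1)
  else none
termination_by cs.length - index

def findAbba (haystack : String) : Option String := findAbbaGo haystack.toList 1

-- ===== PORT B =====
-- Hand port of re.search(r'(.)((?!\1).)\2\1', haystack, re.DOTALL): for this fixed pattern,
-- re.search is exactly the leftmost 4-char window a,b,c,d with a = d, b = c, a ≠ b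
-- (DOTALL makes '.' match every character, so no character-class restriction).
def abbaSearch : List Char → Option String
  | a :: b :: c :: d :: rest =>
      if a == d && b == c && a != b then some (String.mk [a, b, c, d])
      else abbaSearch (b :: c :: d :: rest)
  | _ => none

def findAbba_alt (haystack : String) : Option String := abbaSearch haystack.toList

-- ===== PRECONDITION & SPEC =====
def Spec_findAbba (haystack : String) (out : Option String) : Prop := out = findAbba_alt haystack
instance (haystack : String) (out : Option String) : Decidable (Spec_findAbba haystack out) := by unfold Spec_findAbba; infer_instance

-- ===== CLAIM (what is proved, stated in full; the proofs are below) =====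
def Claim_equal_findAbba : Prop := ∀ (haystack : String), Dom_findAbba haystack → Spec_findAbba haystack (findAbba haystack)

-- ===== LEMMAS AND PROOFS =====

theorem findAbbaGo_eq_abbaSearch (cs : List Char) (j : Nat) :
    findAbbaGo cs (j + 1) = abbaSearch (cs.drop j) := by
  induction hn : cs.length - j using Nat.strong_induction_on generalizing j with
  | _ n ih =>
    match hd : cs.drop j with
    | a :: b :: c :: d :: rest =>
      have hlen : cs.length - j = (cs.drop j).length := (List.length_drop ..).symm
      have h4 : 4 ≤ cs.length - j := by rw [hlen, hd]; simp
      have hj3 : j + 3 < cs.length := by omega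
      have ga : cs.getD j ' ' = a := by
        have : (cs.drop j).getD 0 ' ' = a := by rw [hd]; rfl
        simpa [List.getD, List.getElem?_drop] using this
      have gb : cs.getD (j + 1) ' ' = b := by
        have : (cs.drop j).getD 1 ' ' = b := by rw [hd]; rfl
        simpa [List.getD, List.getElem?_drop] using this
      have gc : cs.getD (j + 2) ' ' = c := by
        have : (cs.drop j).getD 2 ' ' = c := by rw [hd]; rfl
        simpa [List.getD, List.getElem?_drop] using this
      have gd : cs.getD (j + 3) ' ' = d := by
        have : (cs.drop j).getD 3 ' ' = d := by rw [hd]; rfl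
        simpa [List.getD, List.getElem?_drop] using this
      have hdrop1 : cs.drop (j + 1) = b :: c :: d :: rest := by
        have : cs.drop (j + 1) = (cs.drop j).drop 1 := by
          rw [List.drop_drop]
        rw [this, hd]; rfl
      have htake : (cs.drop j).take 4 = [a, b, c, d] := by rw [hd]; rfl
      rw [findAbbaGo]
      simp only [if_pos (by omega : j + 1 + 2 < cs.length)]
      have ihrec : findAbbaGo cs (j + 1 + 1) = abbaSearch (b :: c :: d :: rest) := by
        rw [ih (cs.length - (j + 1)) (by omega) (j + 1) rfl, hdrop1]
      rw [abbaSearch]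
      show (if (cs.getD (j+1) ' ' == cs.getD (j+1+1) ' ') = true then
              if (cs.getD (j+1) ' ' != cs.getD (j+1-1) ' ' &&
                  cs.getD (j+1-1) ' ' == cs.getD (j+1+2) ' ') = true then
                some (String.mk ((cs.drop (j+1-1)).take 4))
              else findAbbaGo cs (j+1+1)
            else findAbbaGo cs (j+1+1)) = _
      have e1 : j + 1 - 1 = j := rfl
      rw [e1, ga, gb, ihrec]
      have : cs.getD (j + 1 + 1) ' ' = c := gc
      rw [this]
      have : cs.getD (j + 1 + 2) ' ' = d := gd
      rw [this, htake]
      by_cases hbc : b = c <;> by_cases had : a = d <;> by_cases hab : a = b <;>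
        by_cases hcd : c = d <;> simp [hbc, had, hab, hcd, bne]
      all_goals first
        | exact fun h => absurd h.symm hcd
        | (by_cases hbd : b = d <;> simp [hbd])
    | [] =>
      have : cs.length ≤ j + 3 := by
        have := congrArg List.length hd
        simp [List.length_drop] at this; omega
      rw [findAbbaGo, if_neg (by omega)]; rfl
    | [a] =>
      have : cs.length ≤ j + 3 := by
        have := congrArg List.length hd
        simp [List.length_drop] at this; omega
      rw [findAbbaGo, if_neg (by omega)]; rfl
    | [a, b] =>
      have : cs.length ≤ j + 3 := by
        have := congrArg List.length hd
        simp [List.length_drop] at this; omega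
      rw [findAbbaGo, if_neg (by omega)]; rfl
    | [a, b, c] =>
      have : cs.length ≤ j + 3 := by
        have := congrArg List.length hd
        simp [List.length_drop] at this; omega
      rw [findAbbaGo, if_neg (by omega)]; rfl

-- ===== VERDICT (by name: the statement is the Claim_ definition above) =====
theorem findAbba_spec : Claim_equal_findAbba := by
  intro haystack _
  unfold Spec_findAbba findAbba findAbba_alt
  simpa using findAbbaGo_eq_abbaSearch haystack.toList 0
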